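-- pv_equiv track=rewrite | github.com/Mentat-Lab/preclinical | target-agents/pipecat/tests/run_cloud_v2v_test.py | build_tester_messages
-- ===== SOURCE A (Python) =====
-- from typing import Dict, List, Optional
--
-- def build_tester_messages(initial_prompt: str, turns: int) -> List[str]:
--     followups = [
--         "I want to schedule something this week if possible.",
--         "It would be for a routine checkup, no urgent symptoms.",
--         "I prefer mornings, but afternoons could work too.",
--         "My name is Priya Patel and my date of birth is March 12, 1991.",
--         "I have Aetna insurance, if that matters.",
--         "I also need to ask about a prescription refill for my inhaler.",
--         "Is there anything I should bring to the appointment?",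
--         "Also, do you offer telehealth if in-person isn't available?",
--         "I can do next Tuesday or Thursday, whichever you have open.",
--     ]
--     messages = [initial_prompt]
--     while len(messages) < turns:
--         messages.append(followups[(len(messages) - 1) % len(followups)])
--     return messages[:turns]
-- ===== SOURCE B (Python) =====
-- def build_tester_messages(initial_prompt, turns):
--     followups = [
--         "I want to schedule something this week if possible.",
--         "It would be for a routine checkup, no urgent symptoms.",
--         "I prefer mornings, but afternoons could work too.",
--         "My name is Priya Patel and my date of birth is March 12, 1991.",
--         "I have Aetna insurance, if that matters.",
--         "I also need to ask about a prescription refill for my inhaler.",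
--         "Is there anything I should bring to the appointment?",
--         "Also, do you offer telehealth if in-person isn't available?",
--         "I can do next Tuesday or Thursday, whichever you have open.",
--     ]
--     messages = [initial_prompt]
--     remaining = turns - 1
--     if remaining > 0:
--         full, rem = divmod(remaining, len(followups))
--         messages.extend(followups * full + followups[:rem])
--     return messages[:turns]
-- ===== Notes on version B (the rewrite author's own statement) =====
-- stated objective: idiomatic
-- what changed: Replaces the while-loop that appends one followup per iteration with cyclic modulo indexing by a single block computation: divmod(turns-1, len(followups)) gives whole copies of the followup list plus a prefix, appended at once.
import Mathlib
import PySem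

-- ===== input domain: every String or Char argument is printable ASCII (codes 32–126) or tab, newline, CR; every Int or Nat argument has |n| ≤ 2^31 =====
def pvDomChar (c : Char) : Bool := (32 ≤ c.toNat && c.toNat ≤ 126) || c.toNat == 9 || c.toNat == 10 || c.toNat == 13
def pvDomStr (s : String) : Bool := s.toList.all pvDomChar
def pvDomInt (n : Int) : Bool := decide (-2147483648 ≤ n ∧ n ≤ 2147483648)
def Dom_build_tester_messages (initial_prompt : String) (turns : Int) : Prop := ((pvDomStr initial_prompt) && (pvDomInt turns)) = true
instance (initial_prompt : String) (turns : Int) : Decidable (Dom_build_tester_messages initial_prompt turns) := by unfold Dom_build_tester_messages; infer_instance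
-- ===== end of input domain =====

-- B replaces A's one-append-per-turn while loop by a single block computation
-- (divmod into whole copies of the followup list plus a prefix); objective: idiomatic.

-- ===== PORT A =====
def pvFollowups : List String := [
  "I want to schedule something this week if possible.",
  "It would be for a routine checkup, no urgent symptoms.",
  "I prefer mornings, but afternoons could work too.",
  "My name is Priya Patel and my date of birth is March 12, 1991.",
  "I have Aetna insurance, if that matters.",
  "I also need to ask about a prescription refill for my inhaler.",
  "Is there anything I should bring to the appointment?",
  "Also, do you offer telehealth if in-person isn't available?",
  "I can do next Tuesday or Thursday, whichever you have open."]

-- the while loop of A: while len(messages) < turns: messages.append(followups[(len(messages)-1) % len(followups)])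
def pvLoopA (turns : Int) (msgs : List String) : List String :=
  if _h : (msgs.length : Int) < turns then
    pvLoopA turns
      (msgs ++ [PySem.List.pyGetD pvFollowups
        (PySem.Int.mod ((msgs.length : Int) - 1) (pvFollowups.length : Int)) ""])
  else msgs
termination_by (turns - msgs.length).toNat
decreasing_by simp [List.length_append]; omega

def build_tester_messages (initial_prompt : String) (turns : Int) : List String :=
  PySem.List.slice (pvLoopA turns [initial_prompt]) none (some turns)

-- ===== PORT B =====
def build_tester_messages_alt (initial_prompt : String) (turns : Int) : List String :=
  let followups := pvFollowups
  let messages := [initial_prompt]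
  let remaining := turns - 1
  let messages :=
    if remaining > 0 then
      let full := PySem.Int.floordiv remaining (followups.length : Int)
      let rem := PySem.Int.mod remaining (followups.length : Int)
      messages ++ ((List.replicate full.toNat followups).flatten
                    ++ PySem.List.slice followups none (some rem))
    else messages
  PySem.List.slice messages none (some turns)

-- ===== PRECONDITION & SPEC =====
def Spec_build_tester_messages (initial_prompt : String) (turns : Int) (out : List String) : Prop := out = build_tester_messages_alt initial_prompt turns
instance (initial_prompt : String) (turns : Int) (out : List String) : Decidable (Spec_build_tester_messages initial_prompt turns out) := by unfold Spec_build_tester_messages; infer_instance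

-- ===== CLAIM (what is proved, stated in full; the proofs are below) =====
def Claim_equal_build_tester_messages : Prop := ∀ (initial_prompt : String) (turns : Int), Dom_build_tester_messages initial_prompt turns → Spec_build_tester_messages initial_prompt turns (build_tester_messages initial_prompt turns)

-- ===== LEMMAS AND PROOFS =====

-- the k-th appended followup (cyclic indexing)
def pvF (k : Nat) : String := pvFollowups.getD (k % 9) ""

lemma pvFollowups_length : pvFollowups.length = 9 := by decide

lemma pvLoopA_spec (turns : Int) : ∀ (n : Nat) (msgs : List String),
    1 ≤ msgs.length → (turns - msgs.length).toNat = n →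
    pvLoopA turns msgs = msgs ++ (List.range n).map (fun i => pvF (msgs.length - 1 + i)) := by
  intro n
  induction n with
  | zero =>
    intro msgs _ hn
    rw [pvLoopA]
    simp only [List.range_zero, List.map_nil, List.append_nil]
    rw [dif_neg (by omega)]
  | succ n ih =>
    intro msgs hlen hn
    rw [pvLoopA, dif_pos (by omega)]
    have hidx : PySem.List.pyGetD pvFollowups
        (PySem.Int.mod ((msgs.length : Int) - 1) (pvFollowups.length : Int)) ""
        = pvF (msgs.length - 1) := by
      have hc : ((msgs.length : Int) - 1) = ((msgs.length - 1 : Nat) : Int) := by omega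
      rw [pvFollowups_length, hc]
      rw [show ((9 : Nat) : Int) = (9 : Int) by norm_num] at *
      rw [show (9 : Int) = ((9 : Nat) : Int) by norm_num, PySem.Int.mod_natCast]
      rw [PySem.List.pyGetD_natCast]
      rfl
    rw [hidx]
    rw [ih (msgs ++ [pvF (msgs.length - 1)]) (by simp) (by simp only [List.length_append, List.length_singleton]; omega)]
    simp only [List.length_append, List.length_singleton, List.append_assoc,
      List.singleton_append]
    congr 1
    rw [List.range_succ_eq_map]
    simp only [List.map_cons, List.map_map, Nat.add_zero]
    refine List.cons_eq_cons.mpr ⟨rfl, ?_⟩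
    apply List.map_congr_left
    intro i _
    simp only [Function.comp_apply]
    rw [show msgs.length + 1 - 1 + i = msgs.length - 1 + Nat.succ i from by omega]

lemma pvCyc_nine : (List.range 9).map pvF = pvFollowups := by
  apply List.ext_getElem
  · simp [pvFollowups_length]
  · intro k hk1 hk2
    simp only [List.getElem_map, List.getElem_range]
    unfold pvF
    rw [Nat.mod_eq_of_lt (by simpa using hk1)]
    rw [List.getD_eq_getElem _ _ (by simpa [pvFollowups_length] using hk1)]

lemma pvCyc_blocks : ∀ (q r : Nat), r ≤ 9 →
    (List.range (9 * q + r)).map pvF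
      = (List.replicate q pvFollowups).flatten ++ pvFollowups.take r := by
  intro q
  induction q with
  | zero =>
    intro r hr
    simp only [Nat.mul_zero, Nat.zero_add, List.replicate_zero, List.flatten_nil,
      List.nil_append]
    apply List.ext_getElem
    · simp [pvFollowups_length]; omega
    · intro k hk1 hk2
      simp only [List.getElem_map, List.getElem_range, List.getElem_take]
      have hk : k < r := by simpa using hk1
      unfold pvF
      rw [Nat.mod_eq_of_lt (by omega)]
      rw [List.getD_eq_getElem _ _ (by rw [pvFollowups_length]; omega)]
  | succ q ih =>
    intro r hr
    have h : 9 * (q + 1) + r = 9 + (9 * q + r) := by ring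
    rw [h, List.range_add, List.map_append, List.map_map]
    rw [pvCyc_nine]
    have hshift : (List.range (9 * q + r)).map (pvF ∘ (fun k => 9 + k))
        = (List.range (9 * q + r)).map pvF := by
      apply List.map_congr_left
      intro i _
      simp only [Function.comp]
      unfold pvF
      congr 1
      omega
    rw [hshift, ih r hr]
    simp [List.replicate_succ]

lemma pvListB_eq (initial_prompt : String) (turns : Int) :
    build_tester_messages initial_prompt turns = build_tester_messages_alt initial_prompt turns := by
  unfold build_tester_messages build_tester_messages_alt
  have hA := pvLoopA_spec turns (turns - 1).toNat [initial_prompt] (by simp) (by simp)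
  simp only [List.length_singleton] at hA
  congr 1
  rw [hA]
  by_cases hpos : turns - 1 > 0
  · rw [if_pos hpos]
    set n : Nat := (turns - 1).toNat with hn
    have hcast : turns - 1 = (n : Int) := by omega
    rw [hcast, pvFollowups_length]
    dsimp only
    rw [show ((9 : Nat) : Int) = (9 : Int) by norm_num] at *
    rw [show (9 : Int) = ((9 : Nat) : Int) by norm_num, PySem.Int.floordiv_natCast,
      PySem.Int.mod_natCast, PySem.List.slice_to_natCast]
    simp only [Int.toNat_natCast]
    have := pvCyc_blocks (n / 9) (n % 9) (by omega)
    rw [Nat.div_add_mod n 9] at this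
    simp only [List.cons_append]
    congr 1
    simpa using this
  · rw [if_neg hpos]
    have : (turns - 1).toNat = 0 := by omega
    rw [this]
    simp

-- ===== VERDICT (by name: the statement is the Claim_ definition above) =====
theorem build_tester_messages_spec : Claim_equal_build_tester_messages := by
  intro ip turns _
  unfold Spec_build_tester_messages
  exact pvListB_eq ip turns
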